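-- pv_equiv track=rewrite | github.com/dancantos/aoc2025 | python/day3/__main__.py | find_largest1
-- ===== SOURCE A (Python) =====
-- def find_largest1(bank):
--     high, low = bank[0], bank[1]
--     for i in range(1, len(bank)):
--         if i < len(bank) - 1 and bank[i] > high:
--             high, low = bank[i], bank[i+1]
--         elif bank[i] > low:
--             low = bank[i]
--     return high*10 + low
-- ===== SOURCE B (Python) =====
-- def find_largest1(bank):
--     prefix = bank[:-1]
--     high = max(prefix)
--     j = prefix.index(high)
--     low = max(bank[j + 1:])
--     return high * 10 + low
-- ===== Notes on version B (the rewrite author's own statement) =====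
-- stated objective: simpler
-- what changed: Replaces A's fused stateful single pass over (high, low) with look-ahead updates by two independent max computations: high = max(bank[:-1]) with its first index j, then low = max(bank[j+1:]).
import Mathlib
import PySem

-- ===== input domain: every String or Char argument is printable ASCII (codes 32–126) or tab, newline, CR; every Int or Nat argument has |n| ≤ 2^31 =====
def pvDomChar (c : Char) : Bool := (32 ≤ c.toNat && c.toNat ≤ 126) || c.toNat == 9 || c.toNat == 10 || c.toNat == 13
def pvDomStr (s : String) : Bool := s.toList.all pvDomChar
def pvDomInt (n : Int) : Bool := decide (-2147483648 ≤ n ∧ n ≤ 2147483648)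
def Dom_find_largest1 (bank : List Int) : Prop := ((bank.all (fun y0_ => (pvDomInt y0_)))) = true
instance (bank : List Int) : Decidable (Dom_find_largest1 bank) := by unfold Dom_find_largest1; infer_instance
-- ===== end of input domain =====

-- B replaces A's fused stateful single (high, low) pass by two independent max scans
-- joined by a first-occurrence index lookup (objective: simpler).

-- ===== PORT A =====
-- loop body of A's for-loop (helper so the proofs can name it)
def pvStepA (bank : List Int) (hl : Int × Int) (i : Int) : Int × Int :=
  if i < (bank.length : Int) - 1 ∧ hl.1 < PySem.List.pyGetD bank i 0 then
    (PySem.List.pyGetD bank i 0, PySem.List.pyGetD bank (i + 1) 0)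
  else if hl.2 < PySem.List.pyGetD bank i 0 then
    (hl.1, PySem.List.pyGetD bank i 0)
  else hl

def find_largest1 (bank : List Int) : Int :=
  match PySem.List.pyGet? bank 0, PySem.List.pyGet? bank 1 with
  | some h0, some l0 =>
      let hl := (PySem.List.pyRange 1 (bank.length : Int) 1).foldl (pvStepA bank) (h0, l0)
      hl.1 * 10 + hl.2
  | _, _ => 0  -- bank[0] / bank[1] raises IndexError: outside Pre_

-- ===== PORT B =====
def find_largest1_alt (bank : List Int) : Int :=
  let pref := PySem.List.slice bank none (some (-1))   -- bank[:-1]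
  match PySem.List.max? pref (fun x => x) with
  | none => 0  -- max([]) raises ValueError: outside Pre_
  | some high =>
    match PySem.List.index? pref high with
    | none => 0  -- unreachable: high ∈ pref
    | some j =>
      match PySem.List.max? (PySem.List.slice bank (some ((j : Int) + 1)) none) (fun x => x) with
      | none => 0  -- unreachable under Pre_
      | some low => high * 10 + low

-- ===== PRECONDITION & SPEC =====
-- A raises IndexError on lists of length < 2 (and B's max([]) raises ValueError there).
def Pre_find_largest1 (bank : List Int) : Prop := 2 ≤ bank.length
instance (bank : List Int) : Decidable (Pre_find_largest1 bank) := by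
  unfold Pre_find_largest1; infer_instance

def pvWitness_find_largest1 : List Int := [3, 1, 4, 1, 5]

def Spec_find_largest1 (bank : List Int) (out : Int) : Prop := out = find_largest1_alt bank
instance (bank : List Int) (out : Int) : Decidable (Spec_find_largest1 bank out) := by
  unfold Spec_find_largest1; infer_instance

-- ===== CLAIM (what is proved, stated in full; the proofs are below) =====
def Claim_equal_find_largest1 : Prop := ∀ (bank : List Int), Dom_find_largest1 bank → Pre_find_largest1 bank → Spec_find_largest1 bank (find_largest1 bank)

-- ===== LEMMAS AND PROOFS =====

-- l[i] with default 0 (all indices used below are in range)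
def pvG (l : List Int) (i : Nat) : Int := l.getD i 0

-- max of l over indices a .. a+k (inclusive)
def pvMx (l : List Int) (a k : Nat) : Int :=
  ((List.range k).map (fun t => pvG l (a + 1 + t))).foldl max (pvG l a)

-- first index attaining pvMx l 0 m (mirrors A's strict-> update rule)
def pvAm (l : List Int) : Nat → Nat
  | 0 => 0
  | m + 1 => if pvMx l 0 m < pvG l (m + 1) then m + 1 else pvAm l m

theorem pvMx_succ (l : List Int) (a k : Nat) :
    pvMx l a (k + 1) = max (pvMx l a k) (pvG l (a + 1 + k)) := by
  simp [pvMx, List.range_succ]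

theorem pvMx_zero (l : List Int) (a : Nat) : pvMx l a 0 = pvG l a := rfl

theorem pvAm_le (l : List Int) (m : Nat) : pvAm l m ≤ m := by
  induction m with
  | zero => simp [pvAm]
  | succ m ih => simp only [pvAm]; split <;> omega

theorem pvLe_mx (l : List Int) {j m : Nat} (h : j ≤ m) : pvG l j ≤ pvMx l 0 m := by
  induction m with
  | zero => interval_cases j; simp [pvMx_zero]
  | succ m ih =>
    rw [pvMx_succ]
    rcases Nat.lt_or_ge j (m + 1) with hj | hj
    · exact le_trans (ih (by omega)) (le_max_left _ _)
    · have hje : j = m + 1 := by omega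
      subst hje
      rw [show (0 : Nat) + 1 + m = m + 1 by omega]
      exact le_max_right _ _

theorem pvAm_max (l : List Int) (m : Nat) : pvG l (pvAm l m) = pvMx l 0 m := by
  induction m with
  | zero => simp [pvAm, pvMx_zero]
  | succ m ih =>
    simp only [pvAm]
    rw [pvMx_succ, show (0 : Nat) + 1 + m = m + 1 by omega]
    split
    · next h => rw [max_eq_right (le_of_lt h)]
    · next h => rw [max_eq_left (not_lt.mp h), ih]

theorem pvAm_lt (l : List Int) (m : Nat) : ∀ j < pvAm l m, pvG l j < pvMx l 0 m := by
  induction m with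
  | zero => simp [pvAm]
  | succ m ih =>
    intro j hj
    simp only [pvAm] at hj
    rw [pvMx_succ, show (0 : Nat) + 1 + m = m + 1 by omega]
    by_cases h : pvMx l 0 m < pvG l (m + 1)
    · rw [if_pos h] at hj
      rw [max_eq_right (le_of_lt h)]
      exact lt_of_le_of_lt (pvLe_mx l (by omega)) h
    · rw [if_neg h] at hj
      rw [max_eq_left (not_lt.mp h)]
      exact ih j hj

-- the low accumulator absorbs one more element
theorem pvLow_step (l : List Int) (k J : Nat) (hJ : J ≤ k) :
    (if pvMx l (J + 1) (max k (J + 1) - (J + 1)) < pvG l (k + 1)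
       then pvG l (k + 1)
       else pvMx l (J + 1) (max k (J + 1) - (J + 1)))
      = pvMx l (J + 1) (max (k + 1) (J + 1) - (J + 1)) := by
  rcases Nat.lt_or_ge J k with hJk | hJk
  · rw [show max k (J + 1) - (J + 1) = k - J - 1 by omega,
      show max (k + 1) (J + 1) - (J + 1) = (k - J - 1) + 1 by omega,
      pvMx_succ, show J + 1 + 1 + (k - J - 1) = k + 1 by omega]
    split
    · next h => rw [max_eq_right (le_of_lt h)]
    · next h => rw [max_eq_left (not_lt.mp h)]
  · have hJk' : J = k := by omega
    subst hJk'
    rw [show max J (J + 1) - (J + 1) = 0 by omega,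
      show max (J + 1) (J + 1) - (J + 1) = 0 by omega, pvMx_zero]
    split <;> rfl

-- one iteration of A's loop preserves the invariant
theorem pvStep_eq (l : List Int) (hn : 2 ≤ l.length) (k : Nat) (hk : k + 1 ≤ l.length - 1) :
    pvStepA l
      (pvMx l 0 (min k (l.length - 2)),
       pvMx l (pvAm l (min k (l.length - 2)) + 1)
             (max k (pvAm l (min k (l.length - 2)) + 1) - (pvAm l (min k (l.length - 2)) + 1)))
      (1 + (k : Int))
      = (pvMx l 0 (min (k + 1) (l.length - 2)),
         pvMx l (pvAm l (min (k + 1) (l.length - 2)) + 1)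
               (max (k + 1) (pvAm l (min (k + 1) (l.length - 2)) + 1)
                 - (pvAm l (min (k + 1) (l.length - 2)) + 1))) := by
  have hg1 : PySem.List.pyGetD l (1 + (k : Int)) 0 = pvG l (k + 1) := by
    rw [show (1 + (k : Int)) = ((k + 1 : Nat) : Int) by push_cast; ring,
      PySem.List.pyGetD_natCast]
    rfl
  have hg2 : PySem.List.pyGetD l (1 + (k : Int) + 1) 0 = pvG l (k + 2) := by
    rw [show (1 + (k : Int) + 1) = ((k + 2 : Nat) : Int) by push_cast; ring,
      PySem.List.pyGetD_natCast]
    rfl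
  by_cases hk1 : k + 1 ≤ l.length - 2
  · rw [show min k (l.length - 2) = k by omega, show min (k + 1) (l.length - 2) = k + 1 by omega]
    have hcond1 : (1 + (k : Int)) < (l.length : Int) - 1 := by
      have : k + 2 ≤ l.length - 1 := by omega
      push_cast; omega
    by_cases hgt : pvMx l 0 k < pvG l (k + 1)
    · -- high update: i = k+1 is a new strict max of the prefix
      have hAm : pvAm l (k + 1) = k + 1 := by
        simp only [pvAm]; rw [if_pos hgt]
      simp only [pvStepA, hg1, hg2]
      rw [if_pos ⟨hcond1, hgt⟩, hAm,
        show pvMx l 0 (k + 1) = pvG l (k + 1) by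
          rw [pvMx_succ, show (0 : Nat) + 1 + k = k + 1 by omega, max_eq_right (le_of_lt hgt)],
        show max (k + 1) (k + 1 + 1) - (k + 1 + 1) = 0 by omega, pvMx_zero]
    · -- no high update, i < len-1
      have hAm : pvAm l (k + 1) = pvAm l k := by
        simp only [pvAm]; rw [if_neg hgt]
      have hMx : pvMx l 0 (k + 1) = pvMx l 0 k := by
        rw [pvMx_succ, show (0 : Nat) + 1 + k = k + 1 by omega,
          max_eq_left (not_lt.mp hgt)]
      simp only [pvStepA, hg1, hg2]
      rw [if_neg (by intro h; exact hgt h.2), hAm, hMx]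
      have hJk : pvAm l k ≤ k := pvAm_le l k
      have := pvLow_step l k (pvAm l k) hJk
      split
      · next h =>
        refine Prod.ext rfl ?_
        rw [if_pos h] at this; exact this
      · next h =>
        refine Prod.ext rfl ?_
        rw [if_neg h] at this; exact this
  · -- i = len-1: the first branch's guard is false
    have hke : k = l.length - 2 := by omega
    rw [show min k (l.length - 2) = k by omega, show min (k + 1) (l.length - 2) = k by omega]
    have hcond1 : ¬ ((1 + (k : Int)) < (l.length : Int) - 1) := by
      have : k + 2 = l.length := by omega
      push_cast; omega
    simp only [pvStepA, hg1, hg2]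
    rw [if_neg (by intro h; exact hcond1 h.1)]
    have hJk : pvAm l k ≤ k := pvAm_le l k
    have := pvLow_step l k (pvAm l k) hJk
    split
    · next h =>
      refine Prod.ext rfl ?_
      rw [if_pos h] at this; exact this
    · next h =>
      refine Prod.ext rfl ?_
      rw [if_neg h] at this; exact this

-- A's loop invariant: state after processing i = 1..k
theorem pvLoop (l : List Int) (hn : 2 ≤ l.length) (k : Nat) (hk : k ≤ l.length - 1) :
    (PySem.List.pyRange 1 (1 + (k : Int)) 1).foldl (pvStepA l) (pvG l 0, pvG l 1)
      = (pvMx l 0 (min k (l.length - 2)),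
         pvMx l (pvAm l (min k (l.length - 2)) + 1)
               (max k (pvAm l (min k (l.length - 2)) + 1) - (pvAm l (min k (l.length - 2)) + 1))) := by
  induction k with
  | zero =>
    simp only [Nat.cast_zero, add_zero]
    rw [PySem.List.pyRange_one_eq_nil (le_refl 1)]
    simp [pvAm, pvMx_zero]
  | succ k ih =>
    have hk' : k ≤ l.length - 1 := by omega
    have hsplit : PySem.List.pyRange 1 (1 + ((k : Nat) + 1 : Nat)) 1
        = PySem.List.pyRange 1 (1 + (k : Int)) 1 ++ [1 + (k : Int)] := by
      rw [show ((1 : Int) + ((k : Nat) + 1 : Nat)) = (1 + (k : Int)) + 1 by push_cast; ring]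
      exact PySem.List.pyRange_one_succ_right (by omega)
    rw [hsplit, List.foldl_append, ih hk', List.foldl_cons, List.foldl_nil]
    exact pvStep_eq l hn k hk

-- the segment l[a : a+k] as a map over range (all indices in bounds)
theorem pvSeg (l : List Int) (a k : Nat) (h : a + k ≤ l.length) :
    (l.drop a).take k = (List.range k).map (fun t => pvG l (a + t)) := by
  apply List.ext_getElem
  · simp; omega
  · intro i h1 h2
    have hi : i < k := by simpa using h2
    have hia : a + i < l.length := by omega
    simp [List.getElem_take, List.getElem_drop, pvG, hia]

-- first-occurrence index lookup
theorem pvIndex_eq (xs : List Int) (v : Int) (k : Nat) (hk : k < xs.length)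
    (hv : xs[k] = v) (hlt : ∀ j, (hj : j < k) → xs[j]'(by omega) ≠ v) :
    PySem.List.index? xs v = some k := by
  rw [PySem.List.index?_eq_some_iff]
  refine ⟨xs.take k, xs.drop (k + 1), ?_, ?_, ?_⟩
  · rw [← hv]
    conv_lhs => rw [← List.take_append_drop k xs]
    congr 1
    rw [List.drop_eq_getElem_cons hk]
  · simp [List.length_take]; omega
  · intro hmem
    obtain ⟨i, hi, hvi⟩ := List.mem_iff_getElem.mp hmem
    have hik : i < k := by
      simp [List.length_take] at hi; omega
    have hxi : xs[i]'(by omega) = v := by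
      rw [← hvi]; simp [List.getElem_take]
    exact hlt i hik hxi

-- ===== VERDICT (by name: the statement is the Claim_ definition above) =====
theorem find_largest1_spec : Claim_equal_find_largest1 := by
  intro l _ hpre
  unfold Spec_find_largest1
  have h2 : 2 ≤ l.length := hpre
  set n := l.length with hn
  set M := pvMx l 0 (n - 2) with hM
  set J := pvAm l (n - 2) with hJdef
  have hJle : J ≤ n - 2 := pvAm_le l (n - 2)
  -- A's side
  have hA : find_largest1 l = M * 10 + pvMx l (J + 1) (n - 2 - J) := by
    have h0 : 0 < l.length := by omega
    have h1 : 1 < l.length := by omega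
    have hg0 : PySem.List.pyGet? l 0 = some (pvG l 0) := by
      rw [show (0 : Int) = ((0 : Nat) : Int) by norm_num, PySem.List.pyGet?_natCast]
      simp [pvG, List.getD_eq_getElem?_getD, List.getElem?_eq_getElem h0]
    have hg1 : PySem.List.pyGet? l 1 = some (pvG l 1) := by
      rw [show (1 : Int) = ((1 : Nat) : Int) by norm_num, PySem.List.pyGet?_natCast]
      simp [pvG, List.getD_eq_getElem?_getD, List.getElem?_eq_getElem h1]
    have hcast : ((l.length : Nat) : Int) = 1 + ((n - 1 : Nat) : Int) := by simp only [hn]; omega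
    simp only [find_largest1, hg0, hg1, hcast, pvLoop l h2 (n - 1) (le_refl _)]
    rw [show min (n - 1) (n - 2) = n - 2 by omega, ← hJdef,
      show max (n - 1) (J + 1) - (J + 1) = n - 2 - J by omega, ← hM]
  -- B's side
  have hpref : PySem.List.slice l none (some (-1)) = (l.drop 0).take (n - 1) := by
    rw [PySem.List.slice_to_neg_one, List.dropLast_eq_take, List.drop_zero, hn]
  have hcons0 : (l.drop 0).take (n - 1)
      = pvG l 0 :: (List.range (n - 2)).map (fun t => pvG l (0 + 1 + t)) := by
    rw [pvSeg l 0 (n - 1) (by omega)]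
    rw [show n - 1 = (n - 2) + 1 by omega, List.range_succ_eq_map]
    simp only [List.map_cons, List.map_map]
    congr 1
    apply List.map_congr_left
    intro t _
    simp only [Function.comp]
    congr 1
    omega
  have hmaxPref : PySem.List.max? (PySem.List.slice l none (some (-1))) (fun x => x)
      = some M := by
    rw [hpref, hcons0, PySem.List.max?_id_cons]
    rfl
  have hidx : PySem.List.index? (PySem.List.slice l none (some (-1))) M = some J := by
    rw [hpref, pvSeg l 0 (n - 1) (by omega)]
    have hlen : J < ((List.range (n - 1)).map (fun t => pvG l (0 + t))).length := by
      simp; omega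
    apply pvIndex_eq _ _ _ hlen
    · simp only [List.getElem_map, List.getElem_range]
      rw [Nat.zero_add, hJdef, pvAm_max, ← hM]
    · intro j hj hv
      simp only [List.getElem_map, List.getElem_range] at hv
      rw [Nat.zero_add] at hv
      exact absurd hv (ne_of_lt (pvAm_lt l (n - 2) j hj))
  have hsuf : PySem.List.slice l (some ((J : Int) + 1)) none = l.drop (J + 1) := by
    rw [show ((J : Int) + 1) = ((J + 1 : Nat) : Int) by push_cast; ring,
      PySem.List.slice_from_natCast]
  have hconsJ : l.drop (J + 1)
      = pvG l (J + 1) :: (List.range (n - 2 - J)).map (fun t => pvG l (J + 1 + 1 + t)) := by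
    have hdt : l.drop (J + 1) = (l.drop (J + 1)).take (n - J - 1) := by
      rw [List.take_of_length_le]; simp; omega
    rw [hdt, pvSeg l (J + 1) (n - J - 1) (by omega)]
    rw [show n - J - 1 = (n - 2 - J) + 1 by omega, List.range_succ_eq_map]
    simp only [List.map_cons, List.map_map]
    congr 1
    apply List.map_congr_left
    intro t _
    simp only [Function.comp]
    congr 1
    omega
  have hmaxSuf : PySem.List.max? (PySem.List.slice l (some ((J : Int) + 1)) none) (fun x => x)
      = some (pvMx l (J + 1) (n - 2 - J)) := by
    rw [hsuf, hconsJ, PySem.List.max?_id_cons]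
    rfl
  have hB : find_largest1_alt l = M * 10 + pvMx l (J + 1) (n - 2 - J) := by
    simp only [find_largest1_alt, hmaxPref, hidx, hmaxSuf]
  rw [hA, hB]
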